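-- pv_equiv track=rewrite | github.com/Ghoreish/usaco | ride/ride.py | numcal
-- ===== SOURCE A (Python) =====
-- def numcal(x):
--     l=list("QWERTYUIOPASDFGHJKLZXCVBNM")
--     l.sort()
--     n=1
--     dic={}
--     for i in l:
--         dic.update({i:n})
--         n+=1
--     num = 1
--     for i in x:
--         if i in dic:
--             num*=dic[i]
--     return num
-- ===== SOURCE B (Python) =====
-- def numcal(x):
--     tally = [0] * 26
--     for ch in x:
--         k = ord(ch) - ord('A')
--         if 0 <= k < 26:
--             tally[k] += 1
--     num = 1
--     for k, c in enumerate(tally):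
--         num *= (k + 1) ** c
--     return num
-- ===== Notes on version B (the rewrite author's own statement) =====
-- stated objective: alternative
-- what changed: Replaces A's per-character dict-lookup product with a counting-sort style two-stage algorithm: one pass tallies letter frequencies into a 26-slot array, then a second pass over the alphabet multiplies (k+1)**count[k]; correct because multiplication is commutative so the product can be regrouped by letter.
import Mathlib
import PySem

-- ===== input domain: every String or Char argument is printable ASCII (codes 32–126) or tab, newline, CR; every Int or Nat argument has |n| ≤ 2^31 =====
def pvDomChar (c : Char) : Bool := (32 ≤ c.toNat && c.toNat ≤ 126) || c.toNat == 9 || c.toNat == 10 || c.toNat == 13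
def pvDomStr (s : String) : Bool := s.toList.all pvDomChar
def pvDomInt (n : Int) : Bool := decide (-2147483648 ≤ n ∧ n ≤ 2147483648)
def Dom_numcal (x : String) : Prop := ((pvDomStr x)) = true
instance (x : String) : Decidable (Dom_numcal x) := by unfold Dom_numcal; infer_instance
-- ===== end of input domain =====

-- B replaces A's per-character dictionary-lookup product by a two-stage counting algorithm:
-- tally letter frequencies into a 26-slot array, then multiply (k+1)^count[k] over the alphabet (alternative; same cost).

-- ===== PORT A =====
def numcal (x : String) : Int :=
  let l : List Char := "QWERTYUIOPASDFGHJKLZXCVBNM".toList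
  let l := PySem.List.sorted l (fun c => c) false
  -- the 'for i in l: dic.update({i:n}); n+=1' loop, carrying (dic, n)
  let st := l.foldl (fun (p : PySem.Dict Char Int × Int) i => (p.1.insert i p.2, p.2 + 1))
    (PySem.Dict.empty, 1)
  let dic := st.1
  x.toList.foldl (fun num i => if dic.contains i then num * dic.getD i 0 else num) 1

-- ===== PORT B =====
-- tally holds the per-letter counts (Python ints that stay ≥ 0, so List Nat); the
-- 'tally[k] += 1' is only reached under the 0 ≤ k < 26 guard, so List.set/getElem! at
-- k.toNat is exact; Python's '**' with the nonnegative count is '^' on the Nat count.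
def numcal_alt (x : String) : Int :=
  let tally : List Nat := x.toList.foldl (fun t c =>
    let k : Int := (c.toNat : Int) - 65
    if 0 ≤ k ∧ k < 26 then t.set k.toNat (t[k.toNat]! + 1) else t) (List.replicate 26 0)
  (PySem.List.enumerate tally).foldl (fun num kc => num * (kc.1 + 1) ^ kc.2) 1

-- ===== PRECONDITION & SPEC =====
def Spec_numcal (x : String) (out : Int) : Prop := out = numcal_alt x
instance (x : String) (out : Int) : Decidable (Spec_numcal x out) := by unfold Spec_numcal; infer_instance

-- ===== CLAIM (what is proved, stated in full; the proofs are below) =====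
def Claim_equal_numcal : Prop := ∀ (x : String), Dom_numcal x → Spec_numcal x (numcal x)

-- ===== LEMMAS AND PROOFS =====

lemma char_toNat_inj {c d : Char} (h : c.toNat = d.toNat) : c = d :=
  Char.ext (UInt32.toNat_inj.mp h)

-- the dictionary A's first loop builds, as a literal
set_option maxRecDepth 8192 in
lemma numcal_dic_eq :
    ((PySem.List.sorted "QWERTYUIOPASDFGHJKLZXCVBNM".toList (fun c => c) false).foldl
      (fun (p : PySem.Dict Char Int × Int) i => (p.1.insert i p.2, p.2 + 1))
      (PySem.Dict.empty, 1)).1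
    = PySem.Dict.mk ([('A',1), ('B',2), ('C',3), ('D',4), ('E',5), ('F',6), ('G',7), ('H',8), ('I',9), ('J',10), ('K',11), ('L',12), ('M',13), ('N',14), ('O',15), ('P',16), ('Q',17), ('R',18), ('S',19), ('T',20), ('U',21), ('V',22), ('W',23), ('X',24), ('Y',25), ('Z',26)] : List (Char × Int)) := by decide

-- lookup in that dictionary is exactly the A..Z position formula
set_option maxHeartbeats 1000000 in
lemma dic_get (c : Char) :
    (PySem.Dict.mk ([('A',1), ('B',2), ('C',3), ('D',4), ('E',5), ('F',6), ('G',7), ('H',8), ('I',9), ('J',10), ('K',11), ('L',12), ('M',13), ('N',14), ('O',15), ('P',16), ('Q',17), ('R',18), ('S',19), ('T',20), ('U',21), ('V',22), ('W',23), ('X',24), ('Y',25), ('Z',26)] : List (Char × Int))).get? c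
      = (if 'A' ≤ c ∧ c ≤ 'Z' then some ((c.toNat : Int) - 64) else none) := by
  by_cases h1 : (('A' == c) = true)
  · rw [PySem.Dict.get?_mk_cons, if_pos h1]
    have he := eq_of_beq h1; subst he; decide
  rw [PySem.Dict.get?_mk_cons, if_neg h1]
  by_cases h2 : (('B' == c) = true)
  · rw [PySem.Dict.get?_mk_cons, if_pos h2]
    have he := eq_of_beq h2; subst he; decide
  rw [PySem.Dict.get?_mk_cons, if_neg h2]
  by_cases h3 : (('C' == c) = true)
  · rw [PySem.Dict.get?_mk_cons, if_pos h3]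
    have he := eq_of_beq h3; subst he; decide
  rw [PySem.Dict.get?_mk_cons, if_neg h3]
  by_cases h4 : (('D' == c) = true)
  · rw [PySem.Dict.get?_mk_cons, if_pos h4]
    have he := eq_of_beq h4; subst he; decide
  rw [PySem.Dict.get?_mk_cons, if_neg h4]
  by_cases h5 : (('E' == c) = true)
  · rw [PySem.Dict.get?_mk_cons, if_pos h5]
    have he := eq_of_beq h5; subst he; decide
  rw [PySem.Dict.get?_mk_cons, if_neg h5]
  by_cases h6 : (('F' == c) = true)
  · rw [PySem.Dict.get?_mk_cons, if_pos h6]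
    have he := eq_of_beq h6; subst he; decide
  rw [PySem.Dict.get?_mk_cons, if_neg h6]
  by_cases h7 : (('G' == c) = true)
  · rw [PySem.Dict.get?_mk_cons, if_pos h7]
    have he := eq_of_beq h7; subst he; decide
  rw [PySem.Dict.get?_mk_cons, if_neg h7]
  by_cases h8 : (('H' == c) = true)
  · rw [PySem.Dict.get?_mk_cons, if_pos h8]
    have he := eq_of_beq h8; subst he; decide
  rw [PySem.Dict.get?_mk_cons, if_neg h8]
  by_cases h9 : (('I' == c) = true)
  · rw [PySem.Dict.get?_mk_cons, if_pos h9]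
    have he := eq_of_beq h9; subst he; decide
  rw [PySem.Dict.get?_mk_cons, if_neg h9]
  by_cases h10 : (('J' == c) = true)
  · rw [PySem.Dict.get?_mk_cons, if_pos h10]
    have he := eq_of_beq h10; subst he; decide
  rw [PySem.Dict.get?_mk_cons, if_neg h10]
  by_cases h11 : (('K' == c) = true)
  · rw [PySem.Dict.get?_mk_cons, if_pos h11]
    have he := eq_of_beq h11; subst he; decide
  rw [PySem.Dict.get?_mk_cons, if_neg h11]
  by_cases h12 : (('L' == c) = true)
  · rw [PySem.Dict.get?_mk_cons, if_pos h12]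
    have he := eq_of_beq h12; subst he; decide
  rw [PySem.Dict.get?_mk_cons, if_neg h12]
  by_cases h13 : (('M' == c) = true)
  · rw [PySem.Dict.get?_mk_cons, if_pos h13]
    have he := eq_of_beq h13; subst he; decide
  rw [PySem.Dict.get?_mk_cons, if_neg h13]
  by_cases h14 : (('N' == c) = true)
  · rw [PySem.Dict.get?_mk_cons, if_pos h14]
    have he := eq_of_beq h14; subst he; decide
  rw [PySem.Dict.get?_mk_cons, if_neg h14]
  by_cases h15 : (('O' == c) = true)
  · rw [PySem.Dict.get?_mk_cons, if_pos h15]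
    have he := eq_of_beq h15; subst he; decide
  rw [PySem.Dict.get?_mk_cons, if_neg h15]
  by_cases h16 : (('P' == c) = true)
  · rw [PySem.Dict.get?_mk_cons, if_pos h16]
    have he := eq_of_beq h16; subst he; decide
  rw [PySem.Dict.get?_mk_cons, if_neg h16]
  by_cases h17 : (('Q' == c) = true)
  · rw [PySem.Dict.get?_mk_cons, if_pos h17]
    have he := eq_of_beq h17; subst he; decide
  rw [PySem.Dict.get?_mk_cons, if_neg h17]
  by_cases h18 : (('R' == c) = true)
  · rw [PySem.Dict.get?_mk_cons, if_pos h18]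
    have he := eq_of_beq h18; subst he; decide
  rw [PySem.Dict.get?_mk_cons, if_neg h18]
  by_cases h19 : (('S' == c) = true)
  · rw [PySem.Dict.get?_mk_cons, if_pos h19]
    have he := eq_of_beq h19; subst he; decide
  rw [PySem.Dict.get?_mk_cons, if_neg h19]
  by_cases h20 : (('T' == c) = true)
  · rw [PySem.Dict.get?_mk_cons, if_pos h20]
    have he := eq_of_beq h20; subst he; decide
  rw [PySem.Dict.get?_mk_cons, if_neg h20]
  by_cases h21 : (('U' == c) = true)
  · rw [PySem.Dict.get?_mk_cons, if_pos h21]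
    have he := eq_of_beq h21; subst he; decide
  rw [PySem.Dict.get?_mk_cons, if_neg h21]
  by_cases h22 : (('V' == c) = true)
  · rw [PySem.Dict.get?_mk_cons, if_pos h22]
    have he := eq_of_beq h22; subst he; decide
  rw [PySem.Dict.get?_mk_cons, if_neg h22]
  by_cases h23 : (('W' == c) = true)
  · rw [PySem.Dict.get?_mk_cons, if_pos h23]
    have he := eq_of_beq h23; subst he; decide
  rw [PySem.Dict.get?_mk_cons, if_neg h23]
  by_cases h24 : (('X' == c) = true)
  · rw [PySem.Dict.get?_mk_cons, if_pos h24]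
    have he := eq_of_beq h24; subst he; decide
  rw [PySem.Dict.get?_mk_cons, if_neg h24]
  by_cases h25 : (('Y' == c) = true)
  · rw [PySem.Dict.get?_mk_cons, if_pos h25]
    have he := eq_of_beq h25; subst he; decide
  rw [PySem.Dict.get?_mk_cons, if_neg h25]
  by_cases h26 : (('Z' == c) = true)
  · rw [PySem.Dict.get?_mk_cons, if_pos h26]
    have he := eq_of_beq h26; subst he; decide
  rw [PySem.Dict.get?_mk_cons, if_neg h26]
  have k1 : c.toNat ≠ 65 := fun he => h1 (beq_iff_eq.mpr (char_toNat_inj (he.trans rfl)).symm)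
  have k2 : c.toNat ≠ 66 := fun he => h2 (beq_iff_eq.mpr (char_toNat_inj (he.trans rfl)).symm)
  have k3 : c.toNat ≠ 67 := fun he => h3 (beq_iff_eq.mpr (char_toNat_inj (he.trans rfl)).symm)
  have k4 : c.toNat ≠ 68 := fun he => h4 (beq_iff_eq.mpr (char_toNat_inj (he.trans rfl)).symm)
  have k5 : c.toNat ≠ 69 := fun he => h5 (beq_iff_eq.mpr (char_toNat_inj (he.trans rfl)).symm)
  have k6 : c.toNat ≠ 70 := fun he => h6 (beq_iff_eq.mpr (char_toNat_inj (he.trans rfl)).symm)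
  have k7 : c.toNat ≠ 71 := fun he => h7 (beq_iff_eq.mpr (char_toNat_inj (he.trans rfl)).symm)
  have k8 : c.toNat ≠ 72 := fun he => h8 (beq_iff_eq.mpr (char_toNat_inj (he.trans rfl)).symm)
  have k9 : c.toNat ≠ 73 := fun he => h9 (beq_iff_eq.mpr (char_toNat_inj (he.trans rfl)).symm)
  have k10 : c.toNat ≠ 74 := fun he => h10 (beq_iff_eq.mpr (char_toNat_inj (he.trans rfl)).symm)
  have k11 : c.toNat ≠ 75 := fun he => h11 (beq_iff_eq.mpr (char_toNat_inj (he.trans rfl)).symm)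
  have k12 : c.toNat ≠ 76 := fun he => h12 (beq_iff_eq.mpr (char_toNat_inj (he.trans rfl)).symm)
  have k13 : c.toNat ≠ 77 := fun he => h13 (beq_iff_eq.mpr (char_toNat_inj (he.trans rfl)).symm)
  have k14 : c.toNat ≠ 78 := fun he => h14 (beq_iff_eq.mpr (char_toNat_inj (he.trans rfl)).symm)
  have k15 : c.toNat ≠ 79 := fun he => h15 (beq_iff_eq.mpr (char_toNat_inj (he.trans rfl)).symm)
  have k16 : c.toNat ≠ 80 := fun he => h16 (beq_iff_eq.mpr (char_toNat_inj (he.trans rfl)).symm)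
  have k17 : c.toNat ≠ 81 := fun he => h17 (beq_iff_eq.mpr (char_toNat_inj (he.trans rfl)).symm)
  have k18 : c.toNat ≠ 82 := fun he => h18 (beq_iff_eq.mpr (char_toNat_inj (he.trans rfl)).symm)
  have k19 : c.toNat ≠ 83 := fun he => h19 (beq_iff_eq.mpr (char_toNat_inj (he.trans rfl)).symm)
  have k20 : c.toNat ≠ 84 := fun he => h20 (beq_iff_eq.mpr (char_toNat_inj (he.trans rfl)).symm)
  have k21 : c.toNat ≠ 85 := fun he => h21 (beq_iff_eq.mpr (char_toNat_inj (he.trans rfl)).symm)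
  have k22 : c.toNat ≠ 86 := fun he => h22 (beq_iff_eq.mpr (char_toNat_inj (he.trans rfl)).symm)
  have k23 : c.toNat ≠ 87 := fun he => h23 (beq_iff_eq.mpr (char_toNat_inj (he.trans rfl)).symm)
  have k24 : c.toNat ≠ 88 := fun he => h24 (beq_iff_eq.mpr (char_toNat_inj (he.trans rfl)).symm)
  have k25 : c.toNat ≠ 89 := fun he => h25 (beq_iff_eq.mpr (char_toNat_inj (he.trans rfl)).symm)
  have k26 : c.toNat ≠ 90 := fun he => h26 (beq_iff_eq.mpr (char_toNat_inj (he.trans rfl)).symm)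
  rw [if_neg]
  · rfl
  · rintro ⟨ha, hb⟩
    rw [Char.le_def, UInt32.le_iff_toNat_le] at ha hb
    have ha' : 65 ≤ c.toNat := ha
    have hb' : c.toNat ≤ 90 := hb
    omega

lemma numcal_step (n : Int) (c : Char) :
    (if (PySem.Dict.mk ([('A',1), ('B',2), ('C',3), ('D',4), ('E',5), ('F',6), ('G',7), ('H',8), ('I',9), ('J',10), ('K',11), ('L',12), ('M',13), ('N',14), ('O',15), ('P',16), ('Q',17), ('R',18), ('S',19), ('T',20), ('U',21), ('V',22), ('W',23), ('X',24), ('Y',25), ('Z',26)] : List (Char × Int))).contains c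
       then n * (PySem.Dict.mk ([('A',1), ('B',2), ('C',3), ('D',4), ('E',5), ('F',6), ('G',7), ('H',8), ('I',9), ('J',10), ('K',11), ('L',12), ('M',13), ('N',14), ('O',15), ('P',16), ('Q',17), ('R',18), ('S',19), ('T',20), ('U',21), ('V',22), ('W',23), ('X',24), ('Y',25), ('Z',26)] : List (Char × Int))).getD c 0 else n)
      = if 'A' ≤ c ∧ c ≤ 'Z' then n * ((c.toNat : Int) - 64) else n := by
  rw [PySem.Dict.contains_eq_isSome_get?]
  simp only [PySem.Dict.getD, dic_get]
  by_cases h : ('A' ≤ c ∧ c ≤ 'Z') <;> simp [h]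

-- the per-letter value a single character contributes to the product
def valC (c : Char) : Int := if 'A' ≤ c ∧ c ≤ 'Z' then (c.toNat : Int) - 64 else 1

-- the product of contributions, in string order
def charProd (l : List Char) : Int := l.foldr (fun c acc => valC c * acc) 1

-- A's multiplying loop computes n * charProd
lemma foldA_eq (l : List Char) (n : Int) :
    l.foldl (fun num i => if 'A' ≤ i ∧ i ≤ 'Z' then num * ((i.toNat : Int) - 64) else num) n
      = n * charProd l := by
  induction l generalizing n with
  | nil => simp [charProd]
  | cons c l ih =>
    simp only [List.foldl_cons, ih, charProd, List.foldr_cons, valC]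
    by_cases h : ('A' ≤ c ∧ c ≤ 'Z') <;> simp [h, mul_assoc]

-- the accumulator factors out of B's multiplying loop
lemma foldB_acc (l : List (Int × Nat)) (n : Int) :
    l.foldl (fun num kc => num * (kc.1 + 1) ^ kc.2) n
      = n * l.foldl (fun num kc => num * (kc.1 + 1) ^ kc.2) 1 := by
  induction l generalizing n with
  | nil => simp
  | cons p l ih =>
    simp only [List.foldl_cons]
    rw [ih (n * _), ih (1 * _)]
    ring

-- incrementing slot k of the tally multiplies B's product by (i + k + 1)
lemma foldB_set (t : List Nat) (i : Int) (k : Nat) (n : Int) (hk : k < t.length) :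
    (PySem.List.enumerate (t.set k (t[k]! + 1)) i).foldl (fun num kc => num * (kc.1 + 1) ^ kc.2) n
      = (PySem.List.enumerate t i).foldl (fun num kc => num * (kc.1 + 1) ^ kc.2) n * (i + k + 1) := by
  induction t generalizing i k n with
  | nil => simp at hk
  | cons a t ih =>
    cases k with
    | zero =>
      simp only [List.getElem!_cons_zero, List.set_cons_zero, PySem.List.enumerate,
        List.foldl_cons]
      rw [foldB_acc _ (n * (i + 1) ^ (a + 1)), foldB_acc _ (n * (i + 1) ^ a)]
      rw [pow_succ]
      push_cast
      ring
    | succ k =>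
      have hk' : k < t.length := by simpa using hk
      simp only [List.getElem!_cons_succ, List.set_cons_succ, PySem.List.enumerate,
        List.foldl_cons]
      rw [ih (i + 1) k _ hk']
      push_cast
      ring

-- the tally-update step multiplies B's product by valC
lemma foldB_upd (t : List Nat) (c : Char) (ht : t.length = 26) :
    (PySem.List.enumerate
        ((fun t c =>
          let k : Int := ((c : Char).toNat : Int) - 65
          if 0 ≤ k ∧ k < 26 then t.set k.toNat (t[k.toNat]! + 1) else t) t c) 0).foldl
      (fun num kc => num * (kc.1 + 1) ^ kc.2) 1
      = (PySem.List.enumerate t 0).foldl (fun num kc => num * (kc.1 + 1) ^ kc.2) 1 * valC c := by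
  simp only
  by_cases h : (0 ≤ ((c.toNat : Int) - 65) ∧ ((c.toNat : Int) - 65) < 26)
  · rw [if_pos h]
    have h65 : 65 ≤ c.toNat := by omega
    have h90 : c.toNat ≤ 90 := by omega
    have hklt : ((c.toNat : Int) - 65).toNat < t.length := by
      rw [ht]; omega
    rw [foldB_set t 0 _ 1 hklt]
    have hup : 'A' ≤ c ∧ c ≤ 'Z' := by
      refine ⟨?_, ?_⟩
      · rw [Char.le_def, UInt32.le_iff_toNat_le]; exact h65
      · rw [Char.le_def, UInt32.le_iff_toNat_le]; exact h90
    rw [valC, if_pos hup]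
    have : ((((c.toNat : Int) - 65).toNat : Int)) = (c.toNat : Int) - 65 := by omega
    rw [this]; ring
  · rw [if_neg h]
    have hup : ¬ ('A' ≤ c ∧ c ≤ 'Z') := by
      rintro ⟨ha, hb⟩
      rw [Char.le_def, UInt32.le_iff_toNat_le] at ha hb
      have ha' : 65 ≤ c.toNat := ha
      have hb' : c.toNat ≤ 90 := hb
      omega
    rw [valC, if_neg hup, mul_one]

-- the whole tally loop multiplies B's product by charProd
lemma foldB_tally (l : List Char) (t : List Nat) (ht : t.length = 26) :
    (PySem.List.enumerate
        (l.foldl (fun t c =>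
          let k : Int := ((c : Char).toNat : Int) - 65
          if 0 ≤ k ∧ k < 26 then t.set k.toNat (t[k.toNat]! + 1) else t) t) 0).foldl
      (fun num kc => num * (kc.1 + 1) ^ kc.2) 1
      = (PySem.List.enumerate t 0).foldl (fun num kc => num * (kc.1 + 1) ^ kc.2) 1 * charProd l := by
  induction l generalizing t with
  | nil => simp [charProd]
  | cons c l ih =>
    have ht' : ((fun t c =>
        let k : Int := ((c : Char).toNat : Int) - 65
        if 0 ≤ k ∧ k < 26 then t.set k.toNat (t[k.toNat]! + 1) else t) t c).length = 26 := by
      simp only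
      split <;> simp [ht]
    simp only [List.foldl_cons]
    rw [ih _ ht', foldB_upd t c ht]
    simp only [charProd, List.foldr_cons]
    rw [mul_assoc]

-- ===== VERDICT (by name: the statement is the Claim_ definition above) =====
theorem numcal_spec : Claim_equal_numcal := by
  intro x _
  unfold Spec_numcal numcal numcal_alt
  simp only [numcal_dic_eq]
  rw [PySem.List.foldl_congr_mem _ _ _ 1 (fun acc c _ => numcal_step acc c)]
  rw [foldA_eq, foldB_tally _ _ (by decide)]
  have h0 : (PySem.List.enumerate (List.replicate 26 0) 0).foldl
      (fun num kc => num * (kc.1 + 1) ^ kc.2) (1 : Int) = 1 := by decide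
  rw [one_mul, h0, one_mul]
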